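-- pv_equiv track=rewrite | github.com/LeanVibe/bee-hive | app/api/v2/agents/utils.py | _are_capabilities_related
-- ===== SOURCE A (Python) =====
-- def _are_capabilities_related(cap1: str, cap2: str) -> bool:
--     """Check if two capabilities are related."""
--     related_groups = [
--         ['python', 'django', 'flask', 'fastapi', 'backend'],
--         ['javascript', 'typescript', 'react', 'vue', 'angular', 'frontend'],
--         ['docker', 'kubernetes', 'aws', 'azure', 'gcp', 'devops'],
--         ['testing', 'pytest', 'jest', 'selenium', 'qa'],
--         ['database', 'sql', 'postgresql', 'mysql', 'mongodb'],
--         ['api', 'rest', 'graphql', 'microservices']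
--     ]
--
--     for group in related_groups:
--         if cap1 in group and cap2 in group:
--             return True
--
--     return False
-- ===== SOURCE B (Python) =====
-- # Flat precomputed capability->group-index table; the check is two O(1) lookups.
-- _CAP_GROUP = {
--     'python': 0, 'django': 0, 'flask': 0, 'fastapi': 0, 'backend': 0,
--     'javascript': 1, 'typescript': 1, 'react': 1, 'vue': 1, 'angular': 1, 'frontend': 1,
--     'docker': 2, 'kubernetes': 2, 'aws': 2, 'azure': 2, 'gcp': 2, 'devops': 2,
--     'testing': 3, 'pytest': 3, 'jest': 3, 'selenium': 3, 'qa': 3,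
--     'database': 4, 'sql': 4, 'postgresql': 4, 'mysql': 4, 'mongodb': 4,
--     'api': 5, 'rest': 5, 'graphql': 5, 'microservices': 5,
-- }
--
-- def _are_capabilities_related(cap1: str, cap2: str) -> bool:
--     """Check if two capabilities are related."""
--     g = _CAP_GROUP.get(cap1)
--     return g is not None and _CAP_GROUP.get(cap2) == g
-- ===== Notes on version B (the rewrite author's own statement) =====
-- stated objective: idiomatic
-- what changed: B replaces the nested groups list and the per-call loop over groups (two membership scans per group) with a single flat capability-to-group-index table built once at module level; the check becomes two dict lookups with a None guard.
import Mathlib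
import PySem

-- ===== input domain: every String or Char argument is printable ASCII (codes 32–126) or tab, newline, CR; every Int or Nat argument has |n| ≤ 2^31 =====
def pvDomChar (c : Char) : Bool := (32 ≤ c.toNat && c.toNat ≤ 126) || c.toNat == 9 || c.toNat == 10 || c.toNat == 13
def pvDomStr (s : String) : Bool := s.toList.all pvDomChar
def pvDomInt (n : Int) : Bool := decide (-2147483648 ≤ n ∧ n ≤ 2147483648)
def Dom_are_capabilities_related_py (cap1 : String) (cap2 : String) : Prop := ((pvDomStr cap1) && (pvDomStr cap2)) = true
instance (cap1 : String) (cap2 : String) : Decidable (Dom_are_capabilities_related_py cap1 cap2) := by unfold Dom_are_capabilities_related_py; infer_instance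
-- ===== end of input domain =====

-- B replaces the nested groups list and the per-call group loop with one flat
-- capability→group-index table and two guarded lookups (idiomatic).

-- ===== PORT A =====
def pvGroupsA : List (List String) :=
  [ ["python", "django", "flask", "fastapi", "backend"],
    ["javascript", "typescript", "react", "vue", "angular", "frontend"],
    ["docker", "kubernetes", "aws", "azure", "gcp", "devops"],
    ["testing", "pytest", "jest", "selenium", "qa"],
    ["database", "sql", "postgresql", "mysql", "mongodb"],
    ["api", "rest", "graphql", "microservices"] ]

-- the 'for group in related_groups' loop with its early return
def pvLoopA : List (List String) → String → String → Bool
  | [], _, _ => false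
  | g :: gs, c1, c2 => if g.contains c1 && g.contains c2 then true else pvLoopA gs c1 c2

def are_capabilities_related_py (cap1 : String) (cap2 : String) : Bool :=
  pvLoopA pvGroupsA cap1 cap2

-- ===== PORT B =====
-- the module-level dict literal _CAP_GROUP (insertion order, keys distinct)
def pvCapGroup : PySem.Dict String Int := PySem.Dict.mk
  [ ("python", 0), ("django", 0), ("flask", 0), ("fastapi", 0), ("backend", 0),
    ("javascript", 1), ("typescript", 1), ("react", 1), ("vue", 1), ("angular", 1), ("frontend", 1),
    ("docker", 2), ("kubernetes", 2), ("aws", 2), ("azure", 2), ("gcp", 2), ("devops", 2),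
    ("testing", 3), ("pytest", 3), ("jest", 3), ("selenium", 3), ("qa", 3),
    ("database", 4), ("sql", 4), ("postgresql", 4), ("mysql", 4), ("mongodb", 4),
    ("api", 5), ("rest", 5), ("graphql", 5), ("microservices", 5) ]

def are_capabilities_related_py_alt (cap1 : String) (cap2 : String) : Bool :=
  match pvCapGroup.get? cap1 with
  | none => false
  | some g => pvCapGroup.get? cap2 == some g

-- ===== PRECONDITION & SPEC =====
def Spec_are_capabilities_related_py (cap1 : String) (cap2 : String) (out : Bool) : Prop := out = are_capabilities_related_py_alt cap1 cap2
instance (cap1 : String) (cap2 : String) (out : Bool) : Decidable (Spec_are_capabilities_related_py cap1 cap2 out) := by unfold Spec_are_capabilities_related_py; infer_instance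

-- ===== CLAIM (what is proved, stated in full; the proofs are below) =====
def Claim_equal_are_capabilities_related_py : Prop := ∀ (cap1 : String) (cap2 : String), Dom_are_capabilities_related_py cap1 cap2 → Spec_are_capabilities_related_py cap1 cap2 (are_capabilities_related_py cap1 cap2)

-- ===== LEMMAS AND PROOFS =====

-- association list "group g's caps ↦ index k, then the rest with indices k+1, …"
def pvMkAssoc : List (List String) → Int → List (String × Int)
  | [], _ => []
  | g :: gs, k => g.map (fun c => (c, k)) ++ pvMkAssoc gs (k + 1)

-- plain first-match lookup in an association list
def pvLookup : List (String × Int) → String → Option Int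
  | [], _ => none
  | (k, v) :: rest, c => if k == c then some v else pvLookup rest c

theorem pvLookup_append (l1 l2 : List (String × Int)) (c : String) :
    pvLookup (l1 ++ l2) c = ((pvLookup l1 c).or (pvLookup l2 c)) := by
  induction l1 with
  | nil => rfl
  | cons p rest ih =>
    obtain ⟨k, v⟩ := p
    simp only [List.cons_append, pvLookup]
    split <;> simp [ih]

theorem pvLookup_map_const (g : List String) (k : Int) (c : String) :
    pvLookup (g.map (fun c => (c, k))) c = if c ∈ g then some k else none := by
  induction g with
  | nil => rfl
  | cons x rest ih =>
    simp only [List.map_cons, pvLookup, List.mem_cons]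
    by_cases h : x = c
    · subst h; simp
    · have h1 : (x == c) = false := beq_eq_false_iff_ne.mpr h
      simp [h1, ih, Ne.symm h]

theorem pvLookup_ge (gs : List (List String)) (k : Int) (c : String) (v : Int)
    (h : pvLookup (pvMkAssoc gs k) c = some v) : k ≤ v := by
  induction gs generalizing k with
  | nil => simp [pvMkAssoc, pvLookup] at h
  | cons g rest ih =>
    rw [pvMkAssoc, pvLookup_append, pvLookup_map_const] at h
    by_cases hc : c ∈ g
    · rw [if_pos hc, Option.some_or] at h
      simp only [Option.some.injEq] at h
      omega
    · rw [if_neg hc, Option.none_or] at h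
      have := ih (k + 1) h
      omega

theorem pvLoopA_none_left (gs : List (List String)) (c1 c2 : String)
    (h : ∀ g ∈ gs, c1 ∉ g) : pvLoopA gs c1 c2 = false := by
  induction gs with
  | nil => rfl
  | cons g rest ih =>
    have hg : c1 ∉ g := h g (by simp)
    rw [pvLoopA, if_neg (by simp [hg])]
    exact ih (fun g' hg' => h g' (by simp [hg']))

theorem pvLoopA_none_right (gs : List (List String)) (c1 c2 : String)
    (h : ∀ g ∈ gs, c2 ∉ g) : pvLoopA gs c1 c2 = false := by
  induction gs with
  | nil => rfl
  | cons g rest ih =>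
    have hg : c2 ∉ g := h g (by simp)
    rw [pvLoopA, if_neg (by simp [hg])]
    exact ih (fun g' hg' => h g' (by simp [hg']))

-- main bridge: A's group loop equals the lookup-based decision, for any disjoint group list
theorem pvMain (gs : List (List String)) (k : Int) (c1 c2 : String)
    (hnd : gs.flatten.Nodup) :
    pvLoopA gs c1 c2 =
      (match pvLookup (pvMkAssoc gs k) c1 with
        | none => false
        | some g => pvLookup (pvMkAssoc gs k) c2 == some g) := by
  induction gs generalizing k with
  | nil => rfl
  | cons g rest ih =>
    rw [List.flatten_cons, List.nodup_append] at hnd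
    obtain ⟨-, hnd', hdisj⟩ := hnd
    have hnotin : ∀ c, c ∈ g → ∀ g' ∈ rest, c ∉ g' := by
      intro c hc g' hg' hc'
      exact hdisj c hc c (List.mem_flatten.mpr ⟨g', hg', hc'⟩) rfl
    rw [pvLoopA, pvMkAssoc, pvLookup_append, pvLookup_append, pvLookup_map_const,
        pvLookup_map_const]
    by_cases h1 : c1 ∈ g
    · by_cases h2 : c2 ∈ g
      · rw [if_pos (by simp [h1, h2]), if_pos h1, if_pos h2]
        simp
      · rw [if_neg (by simp [h2]), if_pos h1, if_neg h2, Option.none_or, Option.some_or]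
        rw [pvLoopA_none_left rest c1 c2 (hnotin c1 h1)]
        cases hl : pvLookup (pvMkAssoc rest (k + 1)) c2 with
        | none => simp
        | some v =>
          have := pvLookup_ge rest (k + 1) c2 v hl
          have hvk : ¬ (v = k) := by omega
          simp [hvk]
    · rw [if_neg (by simp [h1]), if_neg h1, Option.none_or]
      by_cases h2 : c2 ∈ g
      · rw [if_pos h2]
        rw [pvLoopA_none_right rest c1 c2 (hnotin c2 h2)]
        cases hl : pvLookup (pvMkAssoc rest (k + 1)) c1 with
        | none => simp
        | some v =>
          have := pvLookup_ge rest (k + 1) c1 v hl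
          have hkv : ¬ (k = v) := by omega
          simp [Option.some_or, hkv]
      · rw [if_neg h2, Option.none_or]
        exact ih (k + 1) hnd'

-- B's flat table is exactly the association list built from A's groups with indices 0..5
theorem pvCapGroup_eq : pvCapGroup = PySem.Dict.mk (pvMkAssoc pvGroupsA 0) := by decide

theorem pvDictGet_eq_lookup (l : List (String × Int)) (c : String) :
    (PySem.Dict.mk l).get? c = pvLookup l c := by
  induction l with
  | nil => rfl
  | cons p rest ih =>
    obtain ⟨k, v⟩ := p
    rw [PySem.Dict.get?_mk_cons, pvLookup]
    split <;> simp_all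

-- ===== VERDICT (by name: the statement is the Claim_ definition above) =====
theorem are_capabilities_related_py_spec : Claim_equal_are_capabilities_related_py := by
  intro cap1 cap2 _
  show are_capabilities_related_py cap1 cap2 = are_capabilities_related_py_alt cap1 cap2
  unfold are_capabilities_related_py are_capabilities_related_py_alt
  rw [pvCapGroup_eq, pvDictGet_eq_lookup, pvDictGet_eq_lookup]
  exact pvMain pvGroupsA 0 cap1 cap2 (by decide)
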